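-- pv_equiv track=rewrite | github.com/ChangmoKang/problem_solving | PG/코딩테스트_대비반/Search/Lv4_버스_여행.py | solution
-- ===== SOURCE A (Python) =====
-- from collections import deque
--
-- def solution(n,signs):
--     def bfs(start_v):
--         visited = [0]*n
--
--         q = deque([start_v])
--         while q:
--             curr_v = q.popleft()
--             for next_v in signs[curr_v]:
--                 if not visited[next_v]:
--                     visited[next_v] = 1
--                     q.append(next_v)
--         return visited
--
--
--     signs = [[i for i, s in enumerate(sign) if s] for sign in signs]
--
--     return [bfs(v) for v in range(n)]
-- ===== SOURCE B (Python) =====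
-- def solution(n, signs):
--     # Floyd-Warshall transitive closure on the boolean adjacency matrix.
--     reach = [[0] * n for _ in range(n)]
--     for i in range(n):
--         for j, s in enumerate(signs[i]):
--             if s:
--                 reach[i][j] = 1
--     for k in range(n):
--         for i in range(n):
--             for j in range(n):
--                 if reach[i][k] and reach[k][j]:
--                     reach[i][j] = 1
--     return reach
-- ===== Notes on version B (the rewrite author's own statement) =====
-- stated objective: alternative
-- what changed: Replaces the per-source BFS (adjacency lists, a deque and a visited array per start vertex) by a single Floyd-Warshall transitive-closure pass over one n x n boolean matrix seeded from the edges.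
import Mathlib
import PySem

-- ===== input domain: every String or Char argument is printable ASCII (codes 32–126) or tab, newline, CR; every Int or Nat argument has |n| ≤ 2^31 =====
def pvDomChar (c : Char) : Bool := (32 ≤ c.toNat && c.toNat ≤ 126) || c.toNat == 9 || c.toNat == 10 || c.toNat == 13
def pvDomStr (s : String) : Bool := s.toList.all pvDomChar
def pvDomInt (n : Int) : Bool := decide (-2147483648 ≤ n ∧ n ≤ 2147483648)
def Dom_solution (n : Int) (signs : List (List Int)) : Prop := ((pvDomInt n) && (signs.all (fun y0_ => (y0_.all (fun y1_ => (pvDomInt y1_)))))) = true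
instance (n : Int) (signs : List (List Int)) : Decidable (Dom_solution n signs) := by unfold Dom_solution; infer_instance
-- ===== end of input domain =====

-- B replaces A's per-source BFS by one Floyd–Warshall transitive-closure pass over a single
-- n×n boolean matrix (alternative algorithm of the same cubic cost).

-- ===== PORT A =====
-- one step of the BFS inner 'for next_v in signs[curr_v]' loop; state = (visited, rest of deque).
-- the 'j < length' conjunct makes the Python IndexError case a no-op (such inputs are outside Pre_solution)
def pvBfsStep (st : List Int × List Nat) (j : Nat) : List Int × List Nat :=
  if j < st.1.length ∧ st.1.getD j 0 = 0 then (st.1.set j 1, st.2 ++ [j]) else st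

lemma pvCount_set_one (v : List Int) (j : Nat) (hj : j < v.length) (h0 : v.getD j 0 = 0) :
    (v.set j 1).count 0 + 1 = v.count 0 := by
  induction v generalizing j with
  | nil => simp at hj
  | cons a t ih =>
    cases j with
    | zero => simp_all
    | succ j =>
      simp only [List.length_cons, Nat.succ_lt_succ_iff] at hj
      simp only [List.getD_cons_succ] at h0
      have := ih j hj h0
      simp only [List.set_cons_succ, List.count_cons]
      omega

lemma pvBfsStep_measure (st : List Int × List Nat) (j : Nat) :
    2 * ((pvBfsStep st j).1.count 0) + (pvBfsStep st j).2.length ≤ 2 * (st.1.count 0) + st.2.length := by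
  unfold pvBfsStep
  split
  · rename_i h
    have := pvCount_set_one st.1 j h.1 h.2
    simp; omega
  · simp

lemma pvBfsFold_measure (L : List Nat) (st : List Int × List Nat) :
    2 * ((L.foldl pvBfsStep st).1.count 0) + (L.foldl pvBfsStep st).2.length ≤ 2 * (st.1.count 0) + st.2.length := by
  induction L generalizing st with
  | nil => simp
  | cons x L ih => exact le_trans (ih (pvBfsStep st x)) (pvBfsStep_measure st x)

-- the 'while q:' loop of bfs
def pvBfsLoop (adj : List (List Nat)) (v : List Int) (q : List Nat) : List Int :=
  match q with
  | [] => v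
  | u :: q' =>
    let st := (adj.getD u []).foldl pvBfsStep (v, q')
    pvBfsLoop adj st.1 st.2
termination_by 2 * (v.count 0) + q.length
decreasing_by
  have h := pvBfsFold_measure (adj.getD u []) (v, q')
  simp only at h
  simp only [List.length_cons]
  omega

-- '[i for i, s in enumerate(sign) if s]'  (indices are nonnegative, kept as Nat)
def pvConv (sign : List Int) : List Nat :=
  ((PySem.List.enumerate sign).filter (fun p => p.2 != 0)).map (fun p => p.1.toNat)

def solution (n : Int) (signs : List (List Int)) : List (List Int) :=
  let adj := signs.map pvConv
  (PySem.List.pyRange 0 n 1).map (fun v => pvBfsLoop adj (List.replicate n.toNat 0) [v.toNat])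

-- ===== PORT B =====
def pvGet2 (m : List (List Int)) (i j : Nat) : Int := (m.getD i []).getD j 0
def pvSet2 (m : List (List Int)) (i j : Nat) : List (List Int) := m.set i ((m.getD i []).set j 1)

def solution_alt (n : Int) (signs : List (List Int)) : List (List Int) :=
  let nn := n.toNat
  let seeded := (List.range nn).foldl (fun m i =>
      (PySem.List.enumerate (signs.getD i [])).foldl
        (fun m p => if p.2 != 0 then pvSet2 m i p.1.toNat else m) m)
    (List.replicate nn (List.replicate nn 0))
  (List.range nn).foldl (fun m k =>
    (List.range nn).foldl (fun m i =>
      (List.range nn).foldl (fun m j =>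
        if pvGet2 m i k != 0 && pvGet2 m k j != 0 then pvSet2 m i j else m) m) m) seeded

-- ===== PRECONDITION & SPEC =====
-- Pre_solution = exactly the inputs where Python A returns: it raises IndexError when n exceeds
-- the number of rows, or when some row i < n has a truthy entry at a column index ≥ n.
def Pre_solution (n : Int) (signs : List (List Int)) : Prop :=
  n ≤ (signs.length : Int) ∧
  ∀ i < n.toNat, ∀ j < (signs.getD i []).length, (signs.getD i []).getD j 0 ≠ 0 → j < n.toNat
instance (n : Int) (signs : List (List Int)) : Decidable (Pre_solution n signs) := by
  unfold Pre_solution; infer_instance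

def pvWitness_solution : Int × List (List Int) := (2, [[0, 1], [1, 0]])

def Spec_solution (n : Int) (signs : List (List Int)) (out : List (List Int)) : Prop := out = solution_alt n signs
instance (n : Int) (signs : List (List Int)) (out : List (List Int)) : Decidable (Spec_solution n signs out) := by unfold Spec_solution; infer_instance

-- ===== CLAIM (what is proved, stated in full; the proofs are below) =====
def Claim_equal_solution : Prop := ∀ (n : Int) (signs : List (List Int)), Dom_solution n signs → Pre_solution n signs → Spec_solution n signs (solution n signs)

-- ===== LEMMAS AND PROOFS =====

-- the edge relation of the matrix, restricted to vertices < n'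
def pvE (n' : Nat) (signs : List (List Int)) (i j : Nat) : Prop :=
  i < n' ∧ j < n' ∧ j < (signs.getD i []).length ∧ (signs.getD i []).getD j 0 ≠ 0

-- the edge relation of A's adjacency lists
def pvRadj (n' : Nat) (adj : List (List Nat)) (u j : Nat) : Prop := u < n' ∧ j ∈ adj.getD u []

-- 'visited marks j'
def pvMk (v : List Int) (j : Nat) : Prop := v.getD j 0 ≠ 0

lemma pvMk_lt (v : List Int) (j : Nat) (h : pvMk v j) : j < v.length := by
  by_contra hj
  exact h (List.getD_eq_default _ _ (Nat.le_of_not_lt hj))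

lemma pvGetD_set_self {α : Type} (v : List α) (j : Nat) (x d : α) (hj : j < v.length) :
    (v.set j x).getD j d = x := by
  simp [List.getD_eq_getElem?_getD, hj]

lemma pvGetD_set_ne {α : Type} (v : List α) (i j : Nat) (x d : α) (h : i ≠ j) :
    (v.set i x).getD j d = v.getD j d := by
  simp [List.getD_eq_getElem?_getD, List.getElem?_set_ne h]

-- combined invariant of the inner for-loop fold
lemma pvBfsFold_spec (L : List Nat) (v : List Int) (q : List Nat) (hL : ∀ x ∈ L, x < v.length) :
    (L.foldl pvBfsStep (v, q)).1.length = v.length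
    ∧ (∀ j, pvMk v j → pvMk (L.foldl pvBfsStep (v, q)).1 j)
    ∧ (∀ j, pvMk (L.foldl pvBfsStep (v, q)).1 j → pvMk v j ∨ j ∈ L)
    ∧ (∀ j ∈ L, pvMk (L.foldl pvBfsStep (v, q)).1 j)
    ∧ (∀ x ∈ q, x ∈ (L.foldl pvBfsStep (v, q)).2)
    ∧ (∀ x ∈ (L.foldl pvBfsStep (v, q)).2, x ∈ q ∨ x ∈ L)
    ∧ (∀ j, pvMk (L.foldl pvBfsStep (v, q)).1 j → pvMk v j ∨ j ∈ (L.foldl pvBfsStep (v, q)).2)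
    ∧ ((∀ j, v.getD j 0 = 0 ∨ v.getD j 0 = 1) → ∀ j, (L.foldl pvBfsStep (v, q)).1.getD j 0 = 0 ∨ (L.foldl pvBfsStep (v, q)).1.getD j 0 = 1) := by
  induction L generalizing v q with
  | nil =>
    exact ⟨rfl, fun j h => h, fun j h => Or.inl h, by simp, fun x hx => hx,
      fun x hx => Or.inl hx, fun j h => Or.inl h, fun h => h⟩
  | cons x L ih =>
    simp only [List.foldl_cons]
    by_cases hgd : x < v.length ∧ v.getD x 0 = 0
    · have hst : pvBfsStep (v, q) x = (v.set x 1, q ++ [x]) := by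
        simp only [pvBfsStep]; rw [if_pos hgd]
      rw [hst]
      have hLb : ∀ y ∈ L, y < (v.set x 1).length := by
        intro y hy; rw [List.length_set]; exact hL y (List.mem_cons_of_mem _ hy)
      obtain ⟨c1, c2, c3, c4, c5, c6, c7, c8⟩ := ih (v.set x 1) (q ++ [x]) hLb
      have hmkset : ∀ j, pvMk v j → pvMk (v.set x 1) j := by
        intro j hj
        by_cases hjx : j = x
        · subst hjx; unfold pvMk; rw [pvGetD_set_self _ _ _ _ hgd.1]; simp
        · unfold pvMk; rw [pvGetD_set_ne _ _ _ _ _ (fun h => hjx h.symm)]; exact hj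
      have hsetmk : ∀ j, pvMk (v.set x 1) j → pvMk v j ∨ j = x := by
        intro j hj
        by_cases hjx : j = x
        · exact Or.inr hjx
        · left; unfold pvMk at hj; rwa [pvGetD_set_ne _ _ _ _ _ (fun h => hjx h.symm)] at hj
      refine ⟨by rw [c1, List.length_set], ?_, ?_, ?_, ?_, ?_, ?_, ?_⟩
      · exact fun j hj => c2 j (hmkset j hj)
      · intro j hj
        rcases c3 j hj with h | h
        · rcases hsetmk j h with h' | h'
          · exact Or.inl h'
          · exact Or.inr (h' ▸ List.mem_cons_self)
        · exact Or.inr (List.mem_cons_of_mem _ h)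
      · intro j hj
        rcases List.mem_cons.mp hj with rfl | h
        · refine c2 j ?_
          unfold pvMk; rw [pvGetD_set_self _ _ _ _ hgd.1]; simp
        · exact c4 j h
      · exact fun y hy => c5 y (List.mem_append_left _ hy)
      · intro y hy
        rcases c6 y hy with h | h
        · rcases List.mem_append.mp h with h' | h'
          · exact Or.inl h'
          · exact Or.inr (List.mem_cons.mpr (Or.inl (List.mem_singleton.mp h')))
        · exact Or.inr (List.mem_cons_of_mem _ h)
      · intro j hj
        rcases c7 j hj with h | h
        · rcases hsetmk j h with h' | h'
          · exact Or.inl h'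
          · subst h'
            exact Or.inr (c5 j (List.mem_append_right _ (List.mem_singleton_self _)))
        · exact Or.inr h
      · intro h01
        refine c8 ?_
        intro j
        by_cases hjx : j = x
        · subst hjx; rw [pvGetD_set_self _ _ _ _ hgd.1]; simp
        · rw [pvGetD_set_ne _ _ _ _ _ (fun h => hjx h.symm)]; exact h01 j
    · have hst : pvBfsStep (v, q) x = (v, q) := by
        simp only [pvBfsStep]; rw [if_neg hgd]
      rw [hst]
      have hLb : ∀ y ∈ L, y < v.length := fun y hy => hL y (List.mem_cons_of_mem _ hy)
      obtain ⟨c1, c2, c3, c4, c5, c6, c7, c8⟩ := ih v q hLb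
      have hmkx : pvMk v x := by
        intro h0
        exact hgd ⟨hL x List.mem_cons_self, h0⟩
      refine ⟨c1, c2, ?_, ?_, c5, ?_, c7, c8⟩
      · intro j hj
        rcases c3 j hj with h | h
        · exact Or.inl h
        · exact Or.inr (List.mem_cons_of_mem _ h)
      · intro j hj
        rcases List.mem_cons.mp hj with rfl | h
        · exact c2 j hmkx
        · exact c4 j h
      · intro y hy
        rcases c6 y hy with h | h
        · exact Or.inl h
        · exact Or.inr (List.mem_cons_of_mem _ h)

-- master invariant of the while loop
lemma pvBfsLoop_spec (n' : Nat) (adj : List (List Nat)) (start : Nat)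
    (Hb : ∀ u j, u < n' → j ∈ adj.getD u [] → j < n') (hs : start < n')
    (v : List Int) (q : List Nat)
    (h1 : v.length = n')
    (h0 : ∀ j, v.getD j 0 = 0 ∨ v.getD j 0 = 1)
    (h2 : ∀ j, pvMk v j → Relation.TransGen (pvRadj n' adj) start j)
    (h3 : ∀ u ∈ q, u = start ∨ pvMk v u)
    (h4 : ∀ u j, (u = start ∨ pvMk v u) → pvRadj n' adj u j → pvMk v j ∨ u ∈ q) :
    (pvBfsLoop adj v q).length = n'
    ∧ (∀ j, (pvBfsLoop adj v q).getD j 0 = 0 ∨ (pvBfsLoop adj v q).getD j 0 = 1)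
    ∧ (∀ j, pvMk (pvBfsLoop adj v q) j → Relation.TransGen (pvRadj n' adj) start j)
    ∧ (∀ u j, (u = start ∨ pvMk (pvBfsLoop adj v q) u) → pvRadj n' adj u j → pvMk (pvBfsLoop adj v q) j) := by
  have main : ∀ (N : Nat) (v : List Int) (q : List Nat), 2 * v.count 0 + q.length ≤ N →
      v.length = n' →
      (∀ j, v.getD j 0 = 0 ∨ v.getD j 0 = 1) →
      (∀ j, pvMk v j → Relation.TransGen (pvRadj n' adj) start j) →
      (∀ u ∈ q, u = start ∨ pvMk v u) →
      (∀ u j, (u = start ∨ pvMk v u) → pvRadj n' adj u j → pvMk v j ∨ u ∈ q) →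
      (pvBfsLoop adj v q).length = n'
      ∧ (∀ j, (pvBfsLoop adj v q).getD j 0 = 0 ∨ (pvBfsLoop adj v q).getD j 0 = 1)
      ∧ (∀ j, pvMk (pvBfsLoop adj v q) j → Relation.TransGen (pvRadj n' adj) start j)
      ∧ (∀ u j, (u = start ∨ pvMk (pvBfsLoop adj v q) u) → pvRadj n' adj u j → pvMk (pvBfsLoop adj v q) j) := by
    intro N
    induction N with
    | zero =>
      intro v q hm h1 h0 h2 h3 h4
      have hq : q = [] := List.eq_nil_of_length_eq_zero (by omega)
      subst hq
      rw [pvBfsLoop]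
      exact ⟨h1, h0, h2, fun u j hu hR => (h4 u j hu hR).resolve_right (by simp)⟩
    | succ N ihN =>
      intro v q hm h1 h0 h2 h3 h4
      cases q with
      | nil =>
        rw [pvBfsLoop]
        exact ⟨h1, h0, h2, fun u j hu hR => (h4 u j hu hR).resolve_right (by simp)⟩
      | cons u q' =>
        rw [pvBfsLoop]
        have hu' : u < n' := by
          rcases h3 u List.mem_cons_self with rfl | h
          · exact hs
          · exact h1 ▸ pvMk_lt v u h
        have hLb : ∀ x ∈ adj.getD u [], x < v.length := by
          intro x hx; rw [h1]; exact Hb u x hu' hx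
        obtain ⟨c1, c2, c3, c4, c5, c6, c7, c8⟩ := pvBfsFold_spec (adj.getD u []) v q' hLb
        have hmeas := pvBfsFold_measure (adj.getD u []) (v, q')
        simp only at hmeas
        have hTGu : u = start ∨ Relation.TransGen (pvRadj n' adj) start u := by
          rcases h3 u List.mem_cons_self with rfl | h
          · exact Or.inl rfl
          · exact Or.inr (h2 u h)
        refine ihN _ _ (by simp only [List.length_cons] at hm; omega) (c1.trans h1) (c8 h0) ?_ ?_ ?_
        · intro j hj
          rcases c3 j hj with h | h
          · exact h2 j h
          · have hR : pvRadj n' adj u j := ⟨hu', h⟩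
            rcases hTGu with rfl | htg
            · exact Relation.TransGen.single hR
            · exact htg.tail hR
        · intro x hx
          rcases c6 x hx with h | h
          · rcases h3 x (List.mem_cons_of_mem _ h) with rfl | h'
            · exact Or.inl rfl
            · exact Or.inr (c2 x h')
          · exact Or.inr (c4 x h)
        · intro u' j hu'' hR
          rcases hu'' with rfl | hmk
          · rcases h4 u' j (Or.inl rfl) hR with h | h
            · exact Or.inl (c2 j h)
            · rcases List.mem_cons.mp h with rfl | h'
              · exact Or.inl (c4 j hR.2)
              · exact Or.inr (c5 u' h')
          · rcases c7 u' hmk with h | h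
            · rcases h4 u' j (Or.inr h) hR with h' | h'
              · exact Or.inl (c2 j h')
              · rcases List.mem_cons.mp h' with rfl | h''
                · exact Or.inl (c4 j hR.2)
                · exact Or.inr (c5 u' h'')
            · exact Or.inr h
  exact main (2 * v.count 0 + q.length) v q le_rfl h1 h0 h2 h3 h4

lemma pvBfs_correct (n' : Nat) (adj : List (List Nat)) (start : Nat)
    (Hb : ∀ u j, u < n' → j ∈ adj.getD u [] → j < n') (hs : start < n') :
    (pvBfsLoop adj (List.replicate n' 0) [start]).length = n'
    ∧ (∀ j, (pvBfsLoop adj (List.replicate n' 0) [start]).getD j 0 = 0 ∨ (pvBfsLoop adj (List.replicate n' 0) [start]).getD j 0 = 1)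
    ∧ (∀ j, (pvBfsLoop adj (List.replicate n' 0) [start]).getD j 0 ≠ 0 ↔ Relation.TransGen (pvRadj n' adj) start j) := by
  have hrep : ∀ j, (List.replicate n' (0 : Int)).getD j 0 = 0 := by
    intro j
    by_cases hj : j < n'
    · rw [List.getD_eq_getElem _ _ (by simpa using hj)]
      simp
    · exact List.getD_eq_default _ _ (by simpa using Nat.le_of_not_lt hj)
  have hnomk : ∀ j, ¬ pvMk (List.replicate n' (0 : Int)) j := by
    intro j h; exact h (hrep j)
  obtain ⟨c1, c2, c3, c4⟩ := pvBfsLoop_spec n' adj start Hb hs (List.replicate n' 0) [start]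
    (by simp) (fun j => Or.inl (hrep j))
    (fun j hj => absurd hj (hnomk j))
    (fun u hu => Or.inl (List.mem_singleton.mp hu))
    (fun u j hu hR => by
      rcases hu with rfl | h
      · exact Or.inr (List.mem_singleton_self _)
      · exact absurd h (hnomk u))
  refine ⟨c1, c2, fun j => ⟨c3 j, ?_⟩⟩
  intro htg
  have aux : ∀ u j, Relation.TransGen (pvRadj n' adj) u j →
      (u = start ∨ pvMk (pvBfsLoop adj (List.replicate n' 0) [start]) u) →
      pvMk (pvBfsLoop adj (List.replicate n' 0) [start]) j := by
    intro u j h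
    induction h with
    | single e => exact fun hu => c4 _ _ hu e
    | tail h e ih => exact fun hu => c4 _ _ (Or.inr (ih hu)) e
  exact aux start j htg (Or.inl rfl)

-- adjacency-list edges = matrix edges, under Pre
lemma pvMem_conv (row : List Int) (j : Nat) :
    j ∈ pvConv row ↔ j < row.length ∧ row.getD j 0 ≠ 0 := by
  simp only [pvConv, List.mem_map, List.mem_filter, PySem.List.mem_enumerate_iff]
  constructor
  · rintro ⟨p, ⟨⟨k, hk, rfl⟩, hne⟩, rfl⟩
    simp only [bne_iff_ne, ne_eq] at hne
    have hkk : ((0 : Int) + (k : Int)).toNat = k := by simp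
    rw [hkk]
    exact ⟨hk, by rw [List.getD_eq_getElem row 0 hk]; exact hne⟩
  · rintro ⟨hj, hne⟩
    refine ⟨((j : Int), row[j]), ⟨⟨j, hj, by simp⟩, ?_⟩, by simp⟩
    rw [List.getD_eq_getElem row 0 hj] at hne
    simpa using hne

lemma pvAdj_getD (signs : List (List Int)) (u : Nat) :
    (signs.map pvConv).getD u [] = pvConv (signs.getD u []) := by
  simp only [List.getD_eq_getElem?_getD, List.getElem?_map]
  cases h : signs[u]? with
  | none => simp [pvConv, PySem.List.enumerate_nil]
  | some row => simp

lemma pvRadj_iff_E (n' : Nat) (signs : List (List Int))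
    (hPre : ∀ i < n', ∀ j < (signs.getD i []).length, (signs.getD i []).getD j 0 ≠ 0 → j < n')
    (u j : Nat) : pvRadj n' (signs.map pvConv) u j ↔ pvE n' signs u j := by
  unfold pvRadj pvE
  rw [pvAdj_getD, pvMem_conv]
  constructor
  · rintro ⟨hu, hlen, hne⟩
    exact ⟨hu, hPre u hu j hlen hne, hlen, hne⟩
  · rintro ⟨hu, _, hlen, hne⟩
    exact ⟨hu, hlen, hne⟩

-- ---------- B side ----------

def pvDims (n' : Nat) (m : List (List Int)) : Prop :=
  m.length = n' ∧ ∀ i < n', (m.getD i []).length = n'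

def pvE01 (m : List (List Int)) : Prop := ∀ i j, pvGet2 m i j = 0 ∨ pvGet2 m i j = 1

lemma pvGet2_set2 (n' : Nat) (m : List (List Int)) (hd : pvDims n' m) (i j : Nat)
    (hi : i < n') (hj : j < n') (i' j' : Nat) :
    pvGet2 (pvSet2 m i j) i' j' = if i' = i ∧ j' = j then 1 else pvGet2 m i' j' := by
  unfold pvGet2 pvSet2
  by_cases hii : i' = i
  · subst hii
    rw [pvGetD_set_self _ _ _ _ (hd.1 ▸ hi)]
    by_cases hjj : j' = j
    · subst hjj
      rw [pvGetD_set_self _ _ _ _ (by rw [hd.2 i' hi]; exact hj)]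
      simp
    · rw [pvGetD_set_ne _ _ _ _ _ (fun h => hjj h.symm)]
      simp [hjj]
  · rw [pvGetD_set_ne _ _ _ _ _ (fun h => hii h.symm)]
    simp [hii]

lemma pvDims_set2 (n' : Nat) (m : List (List Int)) (hd : pvDims n' m) (i j : Nat) :
    pvDims n' (pvSet2 m i j) := by
  unfold pvSet2
  refine ⟨by simpa using hd.1, fun i' hi' => ?_⟩
  by_cases hii : i' = i
  · subst hii
    rw [pvGetD_set_self _ _ _ _ (hd.1 ▸ hi')]
    simpa using hd.2 i' hi'
  · rw [pvGetD_set_ne _ _ _ _ _ (fun h => hii h.symm)]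
    exact hd.2 i' hi'

-- paths with all intermediate vertices < k
def pvIsPath (E : Nat → Nat → Prop) : Nat → List Nat → Nat → Prop
  | i, [], j => E i j
  | i, m :: l, j => E i m ∧ pvIsPath E m l j

def pvPath (E : Nat → Nat → Prop) (k i j : Nat) : Prop :=
  ∃ l : List Nat, (∀ m ∈ l, m < k) ∧ pvIsPath E i l j

lemma pvIsPath_append (E : Nat → Nat → Prop) (l₁ l₂ : List Nat) (i k j : Nat)
    (h1 : pvIsPath E i l₁ k) (h2 : pvIsPath E k l₂ j) : pvIsPath E i (l₁ ++ k :: l₂) j := by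
  induction l₁ generalizing i with
  | nil => exact ⟨h1, h2⟩
  | cons a l₁ ih => exact ⟨h1.1, ih a h1.2⟩

lemma pvIsPath_split (E : Nat → Nat → Prop) (l₁ l₂ : List Nat) (i m j : Nat)
    (h : pvIsPath E i (l₁ ++ m :: l₂) j) : pvIsPath E i l₁ m ∧ pvIsPath E m l₂ j := by
  induction l₁ generalizing i with
  | nil => exact ⟨h.1, h.2⟩
  | cons a l₁ ih =>
    obtain ⟨p1, p2⟩ := ih a h.2
    exact ⟨⟨h.1, p1⟩, p2⟩

lemma pvPath_succ (E : Nat → Nat → Prop) (k i j : Nat) :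
    pvPath E (k + 1) i j ↔ pvPath E k i j ∨ (pvPath E k i k ∧ pvPath E k k j) := by
  constructor
  · rintro ⟨l, hl, hp⟩
    have main : ∀ (N : Nat) (l : List Nat), l.length ≤ N → (∀ m ∈ l, m < k + 1) →
        ∀ i j, pvIsPath E i l j → pvPath E k i j ∨ (pvPath E k i k ∧ pvPath E k k j) := by
      intro N
      induction N with
      | zero =>
        intro l hlen hb i j hp
        have hnil : l = [] := List.eq_nil_of_length_eq_zero (Nat.le_zero.mp hlen)
        subst hnil
        exact Or.inl ⟨[], by simp, hp⟩
      | succ N ih =>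
        intro l hlen hb i j hp
        by_cases hk : k ∈ l
        · obtain ⟨l₁, l₂, rfl⟩ := List.append_of_mem hk
          obtain ⟨p1, p2⟩ := pvIsPath_split E l₁ l₂ i k j hp
          have hlen' : l₁.length + l₂.length + 1 ≤ N + 1 := by
            simpa [List.length_append, Nat.add_comm, Nat.add_assoc, Nat.add_left_comm] using hlen
          have r1 := ih l₁ (by omega) (fun m hm => hb m (by simp [hm])) i k p1
          have r2 := ih l₂ (by omega) (fun m hm => hb m (by simp [hm])) k j p2
          have q1 : pvPath E k i k := by rcases r1 with h | ⟨h, _⟩ <;> exact h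
          have q2 : pvPath E k k j := by rcases r2 with h | ⟨_, h⟩ <;> exact h
          exact Or.inr ⟨q1, q2⟩
        · refine Or.inl ⟨l, fun m hm => ?_, hp⟩
          have := hb m hm
          have hne : m ≠ k := fun h => hk (h ▸ hm)
          omega
    exact main l.length l le_rfl hl _ _ hp
  · rintro (⟨l, hl, hp⟩ | ⟨⟨l₁, h1, p1⟩, ⟨l₂, h2, p2⟩⟩)
    · exact ⟨l, fun m hm => Nat.lt_succ_of_lt (hl m hm), hp⟩
    · refine ⟨l₁ ++ k :: l₂, fun m hm => ?_, pvIsPath_append E l₁ l₂ _ _ _ p1 p2⟩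
      rcases List.mem_append.mp hm with h | h
      · exact Nat.lt_succ_of_lt (h1 m h)
      · rcases List.mem_cons.mp h with h | h
        · omega
        · exact Nat.lt_succ_of_lt (h2 m h)

lemma pvPath_iff_transGen (E : Nat → Nat → Prop) (n' : Nat)
    (He : ∀ i j, E i j → i < n' ∧ j < n') (i j : Nat) :
    pvPath E n' i j ↔ Relation.TransGen E i j := by
  constructor
  · rintro ⟨l, -, hp⟩
    clear He
    induction l generalizing i with
    | nil => exact Relation.TransGen.single hp
    | cons m l ih => exact Relation.TransGen.head hp.1 (ih m hp.2)
  · intro h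
    induction h with
    | single e => exact ⟨[], by simp, e⟩
    | tail hub e ih =>
      obtain ⟨l, hl, hp⟩ := ih
      rename_i b c
      refine ⟨l ++ [b], fun m hm => ?_, ?_⟩
      · rcases List.mem_append.mp hm with h | h
        · exact hl m h
        · rcases List.mem_singleton.mp h with rfl
          exact (He _ _ e).1
      · exact pvIsPath_append E l [] i b c hp e

-- the FW j-loop
lemma pvJFold_spec (n' : Nat) (i k : Nat) (hi : i < n') (l : List Nat) (hl : ∀ x ∈ l, x < n')
    (m : List (List Int)) (hd : pvDims n' m) (h01 : pvE01 m) :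
    pvDims n' (l.foldl (fun m j => if pvGet2 m i k != 0 && pvGet2 m k j != 0 then pvSet2 m i j else m) m)
    ∧ pvE01 (l.foldl (fun m j => if pvGet2 m i k != 0 && pvGet2 m k j != 0 then pvSet2 m i j else m) m)
    ∧ ∀ i' j', pvGet2 (l.foldl (fun m j => if pvGet2 m i k != 0 && pvGet2 m k j != 0 then pvSet2 m i j else m) m) i' j'
        = if i' = i ∧ j' ∈ l ∧ pvGet2 m i k ≠ 0 ∧ pvGet2 m k j' ≠ 0 then 1 else pvGet2 m i' j' := by
  induction l generalizing m with
  | nil => exact ⟨hd, h01, fun i' j' => by simp⟩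
  | cons j₀ l ih =>
    simp only [List.foldl_cons]
    by_cases hc : pvGet2 m i k ≠ 0 ∧ pvGet2 m k j₀ ≠ 0
    · have hcond : (pvGet2 m i k != 0 && pvGet2 m k j₀ != 0) = true := by
        simp only [Bool.and_eq_true, bne_iff_ne, ne_eq]
        exact ⟨hc.1, hc.2⟩
      rw [if_pos hcond]
      have hj₀ : j₀ < n' := hl j₀ List.mem_cons_self
      have hd₁ := pvDims_set2 n' m hd i j₀
      have g := pvGet2_set2 n' m hd i j₀ hi hj₀
      have h01₁ : pvE01 (pvSet2 m i j₀) := by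
        intro a b; rw [g a b]
        split
        · exact Or.inr rfl
        · exact h01 a b
      have stab_ik : pvGet2 (pvSet2 m i j₀) i k = pvGet2 m i k := by
        rw [g i k]
        split
        · rename_i h
          exact ((h01 i k).resolve_left (h.2 ▸ hc.1)).symm
        · rfl
      have stab_kj : ∀ j', pvGet2 (pvSet2 m i j₀) k j' = pvGet2 m k j' := by
        intro j'
        rw [g k j']
        split
        · rename_i h
          have : pvGet2 m k j' ≠ 0 := h.2 ▸ hc.2
          exact ((h01 k j').resolve_left this).symm
        · rfl
      obtain ⟨d1, d2, d3⟩ := ih (fun x hx => hl x (List.mem_cons_of_mem _ hx)) (pvSet2 m i j₀) hd₁ h01₁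
      refine ⟨d1, d2, fun i' j' => ?_⟩
      rw [d3 i' j', stab_ik, stab_kj j', g i' j']
      simp only [List.mem_cons]
      by_cases h1 : i' = i <;> by_cases h2 : j' = j₀ <;> by_cases h3 : j' ∈ l <;>
        simp [h1, h2, h3, hc.1, hc.2]
    · have hcond : (pvGet2 m i k != 0 && pvGet2 m k j₀ != 0) = false := by
        simp only [Bool.and_eq_false_iff, bne_eq_false_iff_eq]
        by_cases ha : pvGet2 m i k = 0
        · exact Or.inl ha
        · exact Or.inr (by_contra fun hb => hc ⟨ha, hb⟩)
      rw [hcond]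
      simp only [Bool.false_eq_true, if_false]
      obtain ⟨d1, d2, d3⟩ := ih (fun x hx => hl x (List.mem_cons_of_mem _ hx)) m hd h01
      refine ⟨d1, d2, fun i' j' => ?_⟩
      rw [d3 i' j']
      simp only [List.mem_cons]
      split <;> rename_i hA
      · rw [if_pos ⟨hA.1, Or.inr hA.2.1, hA.2.2⟩]
      · split <;> rename_i hB
        · exfalso
          rcases hB.2.1 with rfl | h
          · exact hc ⟨hB.2.2.1, hB.2.2.2⟩
          · exact hA ⟨hB.1, h, hB.2.2⟩
        · rfl

-- the FW i-loop
lemma pvIFold_spec (n' : Nat) (k : Nat) (l : List Nat) (hl : ∀ x ∈ l, x < n')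
    (m : List (List Int)) (hd : pvDims n' m) (h01 : pvE01 m) :
    pvDims n' (l.foldl (fun m i => (List.range n').foldl (fun m j => if pvGet2 m i k != 0 && pvGet2 m k j != 0 then pvSet2 m i j else m) m) m)
    ∧ pvE01 (l.foldl (fun m i => (List.range n').foldl (fun m j => if pvGet2 m i k != 0 && pvGet2 m k j != 0 then pvSet2 m i j else m) m) m)
    ∧ ∀ i j, pvGet2 (l.foldl (fun m i => (List.range n').foldl (fun m j => if pvGet2 m i k != 0 && pvGet2 m k j != 0 then pvSet2 m i j else m) m) m) i j
        = if i ∈ l ∧ j < n' ∧ pvGet2 m i k ≠ 0 ∧ pvGet2 m k j ≠ 0 then 1 else pvGet2 m i j := by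
  induction l generalizing m with
  | nil => exact ⟨hd, h01, fun i j => by simp⟩
  | cons i₀ l ih =>
    simp only [List.foldl_cons]
    have hi₀ : i₀ < n' := hl i₀ List.mem_cons_self
    obtain ⟨e1, e2, e3⟩ := pvJFold_spec n' i₀ k hi₀ (List.range n')
      (fun x hx => List.mem_range.mp hx) m hd h01
    have stab_ik : ∀ i, pvGet2 ((List.range n').foldl (fun m j => if pvGet2 m i₀ k != 0 && pvGet2 m k j != 0 then pvSet2 m i₀ j else m) m) i k = pvGet2 m i k := by
      intro i
      rw [e3 i k]
      split
      · rename_i h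
        rw [h.1]
        exact ((h01 i₀ k).resolve_left h.2.2.1).symm
      · rfl
    have stab_kj : ∀ j, pvGet2 ((List.range n').foldl (fun m j => if pvGet2 m i₀ k != 0 && pvGet2 m k j != 0 then pvSet2 m i₀ j else m) m) k j = pvGet2 m k j := by
      intro j
      rw [e3 k j]
      split
      · rename_i h
        exact ((h01 k j).resolve_left h.2.2.2).symm
      · rfl
    obtain ⟨f1, f2, f3⟩ := ih (fun x hx => hl x (List.mem_cons_of_mem _ hx)) _ e1 e2
    refine ⟨f1, f2, fun i j => ?_⟩
    rw [f3 i j, stab_ik i, stab_kj j, e3 i j]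
    simp only [List.mem_cons, List.mem_range]
    by_cases h1 : i = i₀
    · subst h1
      simp only [true_or]
      split_ifs <;> first | rfl | tauto
    · simp only [h1, false_or, false_and, if_false]

-- abbreviations for the two phases of B (definitionally equal to solution_alt's body)
def pvSeed (n' : Nat) (signs : List (List Int)) : List (List Int) :=
  (List.range n').foldl (fun m i =>
      (PySem.List.enumerate (signs.getD i [])).foldl
        (fun m p => if p.2 != 0 then pvSet2 m i p.1.toNat else m) m)
    (List.replicate n' (List.replicate n' 0))

def pvFW (n' : Nat) (signs : List (List Int)) : List (List Int) :=
  (List.range n').foldl (fun m k =>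
    (List.range n').foldl (fun m i =>
      (List.range n').foldl (fun m j =>
        if pvGet2 m i k != 0 && pvGet2 m k j != 0 then pvSet2 m i j else m) m) m) (pvSeed n' signs)

lemma pvSolution_alt_eq (n : Int) (signs : List (List Int)) :
    solution_alt n signs = pvFW n.toNat signs := rfl

lemma pvSolution_eq (n : Int) (signs : List (List Int)) :
    solution n signs = (PySem.List.pyRange 0 n 1).map
      (fun v => pvBfsLoop (signs.map pvConv) (List.replicate n.toNat 0) [v.toNat]) := rfl

lemma pvIte_ite_or {p q : Prop} [Decidable p] [Decidable q] (a b : Int) :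
    (if p then a else if q then a else b) = if p ∨ q then a else b := by
  split_ifs <;> tauto

-- inner seeding fold (one row)
lemma pvSeedInner_spec (n' : Nat) (i : Nat) (hi : i < n') (l : List (Int × Int))
    (hl : ∀ p ∈ l, p.2 ≠ 0 → p.1.toNat < n')
    (m : List (List Int)) (hd : pvDims n' m) :
    pvDims n' (l.foldl (fun m p => if p.2 != 0 then pvSet2 m i p.1.toNat else m) m)
    ∧ ∀ i' j', pvGet2 (l.foldl (fun m p => if p.2 != 0 then pvSet2 m i p.1.toNat else m) m) i' j'
        = if i' = i ∧ ∃ p ∈ l, p.2 ≠ 0 ∧ p.1.toNat = j' then 1 else pvGet2 m i' j' := by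
  induction l generalizing m with
  | nil => exact ⟨hd, fun i' j' => by simp⟩
  | cons p l ih =>
    simp only [List.foldl_cons]
    by_cases hp : p.2 ≠ 0
    · rw [if_pos (by simpa using hp)]
      have hj : p.1.toNat < n' := hl p List.mem_cons_self hp
      have g := pvGet2_set2 n' m hd i p.1.toNat hi hj
      obtain ⟨d1, d2⟩ := ih (fun q hq => hl q (List.mem_cons_of_mem _ hq)) _ (pvDims_set2 n' m hd i p.1.toNat)
      refine ⟨d1, fun i' j' => ?_⟩
      rw [d2 i' j', g i' j']
      have hGiff : ((i' = i ∧ ∃ q ∈ l, q.2 ≠ 0 ∧ q.1.toNat = j') ∨ (i' = i ∧ j' = p.1.toNat)) ↔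
          (i' = i ∧ ∃ q ∈ p :: l, q.2 ≠ 0 ∧ q.1.toNat = j') := by
        constructor
        · rintro (⟨rfl, q, hql, hq2, rfl⟩ | ⟨rfl, rfl⟩)
          · exact ⟨rfl, q, List.mem_cons_of_mem _ hql, hq2, rfl⟩
          · exact ⟨rfl, p, List.mem_cons_self, hp, rfl⟩
        · rintro ⟨rfl, q, hq, hq2, rfl⟩
          rcases List.mem_cons.mp hq with rfl | hql
          · exact Or.inr ⟨rfl, rfl⟩
          · exact Or.inl ⟨rfl, q, hql, hq2, rfl⟩
      rw [pvIte_ite_or]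
      exact if_congr hGiff rfl rfl
    · rw [if_neg (by simpa using hp)]
      obtain ⟨d1, d2⟩ := ih (fun q hq => hl q (List.mem_cons_of_mem _ hq)) m hd
      refine ⟨d1, fun i' j' => ?_⟩
      rw [d2 i' j']
      have hGiff : (i' = i ∧ ∃ q ∈ l, q.2 ≠ 0 ∧ q.1.toNat = j') ↔
          (i' = i ∧ ∃ q ∈ p :: l, q.2 ≠ 0 ∧ q.1.toNat = j') := by
        constructor
        · rintro ⟨rfl, q, hql, hq2, rfl⟩
          exact ⟨rfl, q, List.mem_cons_of_mem _ hql, hq2, rfl⟩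
        · rintro ⟨rfl, q, hq, hq2, rfl⟩
          rcases List.mem_cons.mp hq with rfl | hql
          · exact absurd hq2 hp
          · exact ⟨rfl, q, hql, hq2, rfl⟩
      exact if_congr hGiff rfl rfl

-- outer seeding fold
lemma pvSeedOuter_spec (n' : Nat) (signs : List (List Int)) (ls : List Nat)
    (hls : ∀ i ∈ ls, i < n')
    (hPre : ∀ i < n', ∀ p ∈ PySem.List.enumerate (signs.getD i []), p.2 ≠ 0 → p.1.toNat < n')
    (m : List (List Int)) (hd : pvDims n' m) :
    pvDims n' (ls.foldl (fun m i => (PySem.List.enumerate (signs.getD i [])).foldl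
        (fun m p => if p.2 != 0 then pvSet2 m i p.1.toNat else m) m) m)
    ∧ ∀ i j, pvGet2 (ls.foldl (fun m i => (PySem.List.enumerate (signs.getD i [])).foldl
        (fun m p => if p.2 != 0 then pvSet2 m i p.1.toNat else m) m) m) i j
      = if i ∈ ls ∧ ∃ p ∈ PySem.List.enumerate (signs.getD i []), p.2 ≠ 0 ∧ p.1.toNat = j
        then 1 else pvGet2 m i j := by
  induction ls generalizing m with
  | nil => exact ⟨hd, fun i j => by simp⟩
  | cons i₀ ls ih =>
    simp only [List.foldl_cons]
    have hi₀ : i₀ < n' := hls i₀ List.mem_cons_self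
    obtain ⟨e1, e2⟩ := pvSeedInner_spec n' i₀ hi₀ (PySem.List.enumerate (signs.getD i₀ []))
      (hPre i₀ hi₀) m hd
    obtain ⟨f1, f2⟩ := ih (fun x hx => hls x (List.mem_cons_of_mem _ hx)) _ e1
    refine ⟨f1, fun i j => ?_⟩
    rw [f2 i j, e2 i j, pvIte_ite_or]
    have hGiff : ((i ∈ ls ∧ ∃ p ∈ PySem.List.enumerate (signs.getD i []), p.2 ≠ 0 ∧ p.1.toNat = j)
        ∨ (i = i₀ ∧ ∃ p ∈ PySem.List.enumerate (signs.getD i₀ []), p.2 ≠ 0 ∧ p.1.toNat = j)) ↔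
        (i ∈ i₀ :: ls ∧ ∃ p ∈ PySem.List.enumerate (signs.getD i []), p.2 ≠ 0 ∧ p.1.toNat = j) := by
      constructor
      · rintro (⟨hm, hc⟩ | ⟨rfl, hc⟩)
        · exact ⟨List.mem_cons_of_mem _ hm, hc⟩
        · exact ⟨List.mem_cons_self, hc⟩
      · rintro ⟨hm, hc⟩
        rcases List.mem_cons.mp hm with rfl | hm'
        · exact Or.inr ⟨rfl, hc⟩
        · exact Or.inl ⟨hm', hc⟩
    exact if_congr hGiff rfl rfl

lemma pvEnum_iff (row : List Int) (j : Nat) :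
    (∃ p ∈ PySem.List.enumerate row, p.2 ≠ 0 ∧ p.1.toNat = j) ↔
    (j < row.length ∧ row.getD j 0 ≠ 0) := by
  simp only [PySem.List.mem_enumerate_iff]
  constructor
  · rintro ⟨p, ⟨k, hk, rfl⟩, hne, rfl⟩
    have hkk : ((0 : Int) + (k : Int)).toNat = k := by simp
    rw [hkk]
    exact ⟨hk, by rw [List.getD_eq_getElem row 0 hk]; exact hne⟩
  · rintro ⟨hj, hne⟩
    refine ⟨((j : Int), row[j]), ⟨j, hj, by simp⟩, ?_, by simp⟩
    rw [List.getD_eq_getElem row 0 hj] at hne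
    exact hne

lemma pvSeed_spec (n' : Nat) (signs : List (List Int))
    (hPre : ∀ i < n', ∀ j < (signs.getD i []).length, (signs.getD i []).getD j 0 ≠ 0 → j < n') :
    pvDims n' (pvSeed n' signs)
    ∧ pvE01 (pvSeed n' signs)
    ∧ ∀ i j, (pvGet2 (pvSeed n' signs) i j ≠ 0 ↔ pvE n' signs i j) := by
  have hPre' : ∀ i < n', ∀ p ∈ PySem.List.enumerate (signs.getD i []), p.2 ≠ 0 → p.1.toNat < n' := by
    intro i hi p hp hne
    have := (pvEnum_iff (signs.getD i []) p.1.toNat).mp ⟨p, hp, hne, rfl⟩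
    exact hPre i hi _ this.1 this.2
  have hd0 : pvDims n' (List.replicate n' (List.replicate n' (0 : Int))) := by
    refine ⟨by simp, fun i hi => ?_⟩
    rw [List.getD_eq_getElem _ _ (by simpa using hi)]
    simp
  have h00 : ∀ i j, pvGet2 (List.replicate n' (List.replicate n' (0 : Int))) i j = 0 := by
    intro i j
    unfold pvGet2
    have hrow : (List.replicate n' (List.replicate n' (0 : Int))).getD i [] = List.replicate n' 0
        ∨ (List.replicate n' (List.replicate n' (0 : Int))).getD i [] = [] := by
      by_cases hi : i < n'
      · left
        rw [List.getD_eq_getElem _ _ (by simpa using hi)]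
        simp
      · right
        exact List.getD_eq_default _ _ (by simpa using Nat.le_of_not_lt hi)
    rcases hrow with h | h <;> rw [h]
    · by_cases hj : j < n'
      · rw [List.getD_eq_getElem _ _ (by simpa using hj)]
        simp
      · exact List.getD_eq_default _ _ (by simpa using Nat.le_of_not_lt hj)
    · simp
  obtain ⟨d1, d2⟩ := pvSeedOuter_spec n' signs (List.range n') (fun x hx => List.mem_range.mp hx)
    hPre' _ hd0
  refine ⟨d1, ?_, ?_⟩
  · intro i j
    rw [show pvGet2 (pvSeed n' signs) i j = _ from d2 i j]
    split
    · exact Or.inr rfl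
    · exact Or.inl (h00 i j)
  · intro i j
    rw [show pvGet2 (pvSeed n' signs) i j = _ from d2 i j]
    unfold pvE
    split <;> rename_i h
    · simp only [List.mem_range] at h
      have := (pvEnum_iff (signs.getD i []) j).mp ?_
      · constructor
        · intro _
          exact ⟨h.1, hPre i h.1 j this.1 this.2, this.1, this.2⟩
        · intro _; exact one_ne_zero
      · obtain ⟨p, hp, hne, hpj⟩ := h.2
        exact ⟨p, hp, hne, hpj⟩
    · rw [h00 i j]
      simp only [List.mem_range, not_and] at h
      constructor
      · intro hzero; exact absurd rfl hzero
      · rintro ⟨hi, hj, hlen, hne⟩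
        exact absurd ((pvEnum_iff _ j).mpr ⟨hlen, hne⟩) (h hi)

lemma pvPath_zero (E : Nat → Nat → Prop) (i j : Nat) : pvPath E 0 i j ↔ E i j := by
  constructor
  · rintro ⟨l, hl, hp⟩
    cases l with
    | nil => exact hp
    | cons m l => exact absurd (hl m List.mem_cons_self) (by omega)
  · intro h; exact ⟨[], by simp, h⟩

lemma pvPath_endpoints (E : Nat → Nat → Prop) (n' : Nat)
    (He : ∀ i j, E i j → i < n' ∧ j < n') (k i j : Nat) (h : pvPath E k i j) :
    i < n' ∧ j < n' := by
  obtain ⟨l, -, hp⟩ := h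
  induction l generalizing i with
  | nil => exact He i j hp
  | cons m l ih => exact ⟨(He i m hp.1).1, (ih m hp.2).2⟩

lemma pvKLoop_spec (n' : Nat) (signs : List (List Int))
    (hPre : ∀ i < n', ∀ j < (signs.getD i []).length, (signs.getD i []).getD j 0 ≠ 0 → j < n')
    (k : Nat) :
    pvDims n' ((List.range k).foldl (fun m k =>
      (List.range n').foldl (fun m i =>
        (List.range n').foldl (fun m j =>
          if pvGet2 m i k != 0 && pvGet2 m k j != 0 then pvSet2 m i j else m) m) m) (pvSeed n' signs))
    ∧ pvE01 ((List.range k).foldl (fun m k =>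
      (List.range n').foldl (fun m i =>
        (List.range n').foldl (fun m j =>
          if pvGet2 m i k != 0 && pvGet2 m k j != 0 then pvSet2 m i j else m) m) m) (pvSeed n' signs))
    ∧ ∀ i j, ((pvGet2 ((List.range k).foldl (fun m k =>
      (List.range n').foldl (fun m i =>
        (List.range n').foldl (fun m j =>
          if pvGet2 m i k != 0 && pvGet2 m k j != 0 then pvSet2 m i j else m) m) m) (pvSeed n' signs)) i j ≠ 0)
        ↔ pvPath (pvE n' signs) k i j) := by
  have He : ∀ i j, pvE n' signs i j → i < n' ∧ j < n' := fun i j h => ⟨h.1, h.2.1⟩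
  induction k with
  | zero =>
    obtain ⟨d1, d2, d3⟩ := pvSeed_spec n' signs hPre
    refine ⟨d1, d2, fun i j => ?_⟩
    rw [pvPath_zero]
    exact d3 i j
  | succ k ih =>
    set Mk := (List.range k).foldl (fun m k =>
      (List.range n').foldl (fun m i =>
        (List.range n').foldl (fun m j =>
          if pvGet2 m i k != 0 && pvGet2 m k j != 0 then pvSet2 m i j else m) m) m) (pvSeed n' signs) with hMk
    obtain ⟨d1, d2, d3⟩ := ih
    rw [List.range_succ, List.foldl_append, List.foldl_cons, List.foldl_nil]
    obtain ⟨f1, f2, f3⟩ := pvIFold_spec n' k (List.range n') (fun x hx => List.mem_range.mp hx) Mk d1 d2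
    refine ⟨f1, f2, fun i j => ?_⟩
    rw [f3 i j, pvPath_succ]
    have hiff : (i ∈ List.range n' ∧ j < n' ∧ pvGet2 Mk i k ≠ 0 ∧ pvGet2 Mk k j ≠ 0) ↔
        (pvPath (pvE n' signs) k i k ∧ pvPath (pvE n' signs) k k j) := by
      constructor
      · rintro ⟨-, -, h1, h2⟩
        exact ⟨(d3 i k).mp h1, (d3 k j).mp h2⟩
      · rintro ⟨h1, h2⟩
        exact ⟨List.mem_range.mpr (pvPath_endpoints _ n' He k i k h1).1,
          (pvPath_endpoints _ n' He k k j h2).2, (d3 i k).mpr h1, (d3 k j).mpr h2⟩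
    split <;> rename_i hcond
    · constructor
      · intro _; exact Or.inr (hiff.mp hcond)
      · intro _; exact one_ne_zero
    · rw [d3 i j]
      constructor
      · exact Or.inl
      · rintro (h | h)
        · exact h
        · exact absurd (hiff.mpr h) hcond

lemma pvTransGen_congr {r s : Nat → Nat → Prop} (h : ∀ a b, r a b ↔ s a b) (a b : Nat) :
    Relation.TransGen r a b ↔ Relation.TransGen s a b :=
  ⟨Relation.TransGen.mono (fun a b hr => (h a b).mp hr),
   Relation.TransGen.mono (fun a b hs => (h a b).mpr hs)⟩

-- ===== VERDICT (by name: the statement is the Claim_ definition above) =====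
theorem solution_spec : Claim_equal_solution := by
  intro n signs _ hpre
  unfold Spec_solution
  obtain ⟨-, hPre⟩ := hpre
  rw [pvSolution_eq, pvSolution_alt_eq]
  unfold pvFW
  set n' := n.toNat with hn'
  have Hb : ∀ u j, u < n' → j ∈ (signs.map pvConv).getD u [] → j < n' := by
    intro u j hu hj
    rw [pvAdj_getD, pvMem_conv] at hj
    exact hPre u hu j hj.1 hj.2
  obtain ⟨m1, m2, m3⟩ := pvKLoop_spec n' signs hPre n'
  set M := (List.range n').foldl (fun m k =>
      (List.range n').foldl (fun m i =>
        (List.range n').foldl (fun m j =>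
          if pvGet2 m i k != 0 && pvGet2 m k j != 0 then pvSet2 m i j else m) m) m) (pvSeed n' signs) with hM
  apply List.ext_getElem
  · simp only [List.length_map, PySem.List.length_pyRange_one]
    rw [m1.1]
    omega
  intro t ht1 ht2
  have htn : t < n' := by rw [m1.1] at ht2; exact ht2
  rw [List.getElem_map, PySem.List.getElem_pyRange_one]
  have htoNat : ((0 : Int) + (t : Int)).toNat = t := by simp
  rw [htoNat]
  obtain ⟨c1, c2, c3⟩ := pvBfs_correct n' (signs.map pvConv) t Hb htn
  apply List.ext_getElem
  · rw [c1]
    have := m1.2 t htn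
    rw [List.getD_eq_getElem _ _ ht2] at this
    rw [this]
  intro j hj1 hj2
  have hA : (pvBfsLoop (signs.map pvConv) (List.replicate n' 0) [t])[j] =
      (pvBfsLoop (signs.map pvConv) (List.replicate n' 0) [t]).getD j 0 :=
    (List.getD_eq_getElem _ _ hj1).symm
  have hB : M[t][j] = pvGet2 M t j := by
    unfold pvGet2
    rw [List.getD_eq_getElem _ _ ht2, List.getD_eq_getElem _ _ hj2]
  rw [hA, hB]
  have hiff : (pvBfsLoop (signs.map pvConv) (List.replicate n' 0) [t]).getD j 0 ≠ 0 ↔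
      pvGet2 M t j ≠ 0 := by
    rw [c3 j, m3 t j,
      pvTransGen_congr (pvRadj_iff_E n' signs hPre) t j,
      pvPath_iff_transGen (pvE n' signs) n' (fun i j h => ⟨h.1, h.2.1⟩)]
  rcases c2 j with ha | ha <;> rcases m2 t j with hb | hb
  · rw [ha, hb]
  · exact absurd (hiff.mpr (by rw [hb]; exact one_ne_zero)) (fun h => h ha)
  · exact absurd (hiff.mp (by rw [ha]; exact one_ne_zero)) (fun h => h hb)
  · rw [ha, hb]
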